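-- pv_equiv track=rewrite | github.com/GitMonsters/octotetrahedral-agi | arc-puzzle-catalog/re-arc/solves/511d6c88/solver.py | choose_bar
-- ===== SOURCE A (Python) =====
-- from typing import DefaultDict, List, Tuple
--
-- Bar = Tuple[int, int, int]
--
-- def choose_bar(bars: List[Bar], row: int, col: int) -> int:
--     candidates = [
--         index
--         for index, (_, start, end) in enumerate(bars)
--         if start <= col <= end
--     ]
--     if len(candidates) == 1:
--         return candidates[0]
--     return min(candidates, key=lambda index: abs(row - bars[index][0]))
-- ===== SOURCE B (Python) =====
-- def choose_bar(bars, row, col):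
--     keyed = sorted(
--         (abs(row - bar_row), index)
--         for index, (bar_row, start, end) in enumerate(bars)
--         if start <= col <= end
--     )
--     return keyed[0][1]
-- ===== Notes on version B (the rewrite author's own statement) =====
-- stated objective: alternative
-- what changed: Replaces A's filter-then-min(key=...) selection with a sort-based one: build (distance, index) pairs for the covering bars, sort them lexicographically, and return the index of the first pair; strictly increasing indices make the lexicographic minimum coincide with A's first-minimal-distance index.
import Mathlib
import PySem

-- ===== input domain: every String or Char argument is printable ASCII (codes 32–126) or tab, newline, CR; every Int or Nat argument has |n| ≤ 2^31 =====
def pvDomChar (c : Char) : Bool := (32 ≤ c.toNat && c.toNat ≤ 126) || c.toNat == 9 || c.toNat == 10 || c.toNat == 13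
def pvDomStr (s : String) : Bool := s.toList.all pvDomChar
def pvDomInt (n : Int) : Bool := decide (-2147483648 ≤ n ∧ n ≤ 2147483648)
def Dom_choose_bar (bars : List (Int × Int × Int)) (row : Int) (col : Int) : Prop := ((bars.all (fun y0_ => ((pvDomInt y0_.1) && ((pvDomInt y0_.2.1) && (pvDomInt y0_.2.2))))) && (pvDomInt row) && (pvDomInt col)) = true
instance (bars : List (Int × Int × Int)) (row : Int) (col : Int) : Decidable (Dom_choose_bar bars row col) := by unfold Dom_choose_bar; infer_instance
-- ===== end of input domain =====

-- B replaces A's filter-then-min(key=…) with sort-(distance,index)-then-take-first (objective: alternative).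

-- ===== PORT A =====
def choose_bar (bars : List (Int × Int × Int)) (row : Int) (col : Int) : Int :=
  let candidates : List Int :=
    ((PySem.List.enumerate bars).filter
      (fun p => decide (p.2.2.1 ≤ col ∧ col ≤ p.2.2.2))).map (fun p => p.1)
  if candidates.length = 1 then
    candidates.headD 0
  else
    -- min() over an empty candidate list raises ValueError in Python: excluded by Pre_
    (PySem.List.min? candidates
      (fun index => |row - (PySem.List.pyGetD bars index (0, 0, 0)).1|)).getD 0

-- ===== PORT B =====
def choose_bar_alt (bars : List (Int × Int × Int)) (row : Int) (col : Int) : Int :=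
  let keyed : List (Int × Int) :=
    PySem.List.sorted2
      (((PySem.List.enumerate bars).filter
          (fun p => decide (p.2.2.1 ≤ col ∧ col ≤ p.2.2.2))).map
        (fun p => (|row - p.2.1|, p.1)))
      (fun q => q.1) (fun q => q.2)
  match keyed with
  | [] => 0          -- Python B raises IndexError here: excluded by Pre_
  | q :: _ => q.2

-- ===== PRECONDITION & SPEC =====
-- Pre_ excludes exactly the inputs where no bar covers col: there A's min() raises ValueError
-- (and B's keyed[0] raises IndexError).
def Pre_choose_bar (bars : List (Int × Int × Int)) (row : Int) (col : Int) : Prop :=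
  ∃ b ∈ bars, b.2.1 ≤ col ∧ col ≤ b.2.2
instance (bars : List (Int × Int × Int)) (row : Int) (col : Int) : Decidable (Pre_choose_bar bars row col) := by unfold Pre_choose_bar; infer_instance
def pvWitness_choose_bar : (List (Int × Int × Int)) × Int × Int := ([(0, 0, 2)], 1, 1)
def Spec_choose_bar (bars : List (Int × Int × Int)) (row : Int) (col : Int) (out : Int) : Prop := out = choose_bar_alt bars row col
instance (bars : List (Int × Int × Int)) (row : Int) (col : Int) (out : Int) : Decidable (Spec_choose_bar bars row col out) := by unfold Spec_choose_bar; infer_instance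

-- ===== CLAIM (what is proved, stated in full; the proofs are below) =====
def Claim_equal_choose_bar : Prop := ∀ (bars : List (Int × Int × Int)) (row : Int) (col : Int), Dom_choose_bar bars row col → Pre_choose_bar bars row col → Spec_choose_bar bars row col (choose_bar bars row col)

-- ===== LEMMAS AND PROOFS =====

-- min?'s fold step over Option (as in PySem.List.min?'s definition), named so it can be rewritten
def pvStep (key : Int → Int) : Option Int → Int → Option Int
  | none, x => some x
  | some m, x => if key x < key m then some x else some m

theorem pv_min?_eq_foldl (xs : List Int) (key : Int → Int) :
    PySem.List.min? xs key = xs.foldl (pvStep key) none := by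
  unfold PySem.List.min?
  apply PySem.List.foldl_congr_mem
  intro acc x _
  cases acc <;> rfl

theorem pv_foldl_step_some (key : Int → Int) :
    ∀ (l : List Int) (m : Int),
      l.foldl (pvStep key) (some m)
        = some (l.foldl (fun m x => if key x < key m then x else m) m) := by
  intro l
  induction l with
  | nil => intro m; rfl
  | cons x t ih =>
    intro m
    simp only [List.foldl_cons, pvStep]
    by_cases h : key x < key m
    · simp only [h, if_pos, ih]
    · simp only [h, if_false, ih]

-- the lexicographic "before" test sorted2 uses on (distance, index) pairs
def pvBefore (a b : Int × Int) : Bool :=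
  decide (a.1 < b.1) || !decide (b.1 < a.1) && decide (a.2 < b.2)

-- head of an insertion is decided by comparing with the old head only
theorem pv_foldl_insertBy_head (before : Int × Int → Int × Int → Bool) :
    ∀ (l : List (Int × Int)) (h : Int × Int) (t : List (Int × Int)),
      ∃ t', l.foldl (fun acc x => PySem.List.insertBy before x acc) (h :: t)
        = (l.foldl (fun m x => if before x m then x else m) h) :: t' := by
  intro l
  induction l with
  | nil => intro h t; exact ⟨t, rfl⟩
  | cons x xs ih =>
    intro h t
    simp only [List.foldl_cons, PySem.List.insertBy]
    by_cases hb : before x h = true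
    · simp only [hb, if_pos]
      exact ih x (h :: t)
    · have hb' : before x h = false := by simpa using hb
      simp only [hb', Bool.false_eq_true, if_false]
      exact ih h (PySem.List.insertBy before x t)

-- over pairs (key i, i) with strictly increasing i, the lexicographic running
-- minimum computes exactly the key-only (first-wins) running minimum
theorem pv_fold_pairs (key : Int → Int) :
    ∀ (cands : List Int) (m : Int),
      (∀ i ∈ cands, m < i) → cands.Pairwise (· < ·) →
      (cands.map (fun i => ((key i, i) : Int × Int))).foldl
          (fun m x => if pvBefore x m then x else m) (key m, m)
        = (key (cands.foldl (fun m x => if key x < key m then x else m) m),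
           cands.foldl (fun m x => if key x < key m then x else m) m) := by
  intro cands
  induction cands with
  | nil => intro m _ _; rfl
  | cons i t ih =>
    intro m hlt hpw
    have hmi : m < i := hlt i (List.mem_cons_self ..)
    have hti : ∀ j ∈ t, i < j := (List.pairwise_cons.mp hpw).1
    have htl : t.Pairwise (· < · : Int → Int → Prop) := (List.pairwise_cons.mp hpw).2
    simp only [List.map_cons, List.foldl_cons]
    by_cases hk : key i < key m
    · have hb : pvBefore (key i, i) (key m, m) = true := by
        simp [pvBefore, hk]
      simp only [hb, if_pos, hk]
      exact ih i hti htl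
    · have hb : pvBefore (key i, i) (key m, m) = false := by
        simp only [pvBefore]
        have : ¬ i < m := by omega
        simp [hk, this]
      simp only [hb, Bool.false_eq_true, if_false, hk, if_false]
      exact ih m (fun j hj => lt_trans hmi (hti j hj)) htl

-- the key A re-reads from bars agrees with the bar stored in the enumerate pair
theorem pv_key_agrees (bars : List (Int × Int × Int)) (row col : Int) :
    ∀ p ∈ (PySem.List.enumerate bars).filter
        (fun p => decide (p.2.2.1 ≤ col ∧ col ≤ p.2.2.2)),
      ((|row - p.2.1|, p.1) : Int × Int)
        = ((fun index => |row - (PySem.List.pyGetD bars index (0, 0, 0)).1|) p.1, p.1) := by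
  intro p hp
  have hmem : p ∈ PySem.List.enumerate bars := (List.mem_filter.mp hp).1
  obtain ⟨k, hk, rfl⟩ := (PySem.List.mem_enumerate_iff _ _ _).mp hmem
  simp [PySem.List.pyGetD_natCast, List.getD, hk]

-- ===== VERDICT (by name: the statement is the Claim_ definition above) =====
theorem choose_bar_spec : Claim_equal_choose_bar := by
  intro bars row col _ hpre
  unfold Spec_choose_bar choose_bar choose_bar_alt
  set key : Int → Int := fun index => |row - (PySem.List.pyGetD bars index (0, 0, 0)).1| with hkey
  set filtered := (PySem.List.enumerate bars).filter
    (fun p => decide (p.2.2.1 ≤ col ∧ col ≤ p.2.2.2)) with hfil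
  -- B's keyed pairs are exactly (key i, i) over A's candidates
  have hkeyed : filtered.map (fun p => ((|row - p.2.1|, p.1) : Int × Int))
      = (filtered.map (fun p => p.1)).map (fun i => ((key i, i) : Int × Int)) := by
    rw [List.map_map]
    exact List.map_congr_left (pv_key_agrees bars row col)
  -- candidates are strictly increasing
  have hpw : (filtered.map (fun p => p.1)).Pairwise (· < · : Int → Int → Prop) := by
    rw [List.pairwise_map]
    exact (PySem.List.pairwise_lt_enumerate bars 0).filter _
  -- candidates are nonempty (Pre_)
  have hne : filtered.map (fun p => p.1) ≠ [] := by
    obtain ⟨b, hb, h1, h2⟩ := hpre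
    obtain ⟨k, hk, rfl⟩ := List.getElem_of_mem hb
    have hmem : ((0 + (k : Int), bars[k]) ∈ PySem.List.enumerate bars 0) :=
      (PySem.List.mem_enumerate_iff _ _ _).mpr ⟨k, hk, rfl⟩
    have : ((0 + (k : Int), bars[k]) ∈ filtered) := by
      rw [hfil, List.mem_filter]
      exact ⟨hmem, by simp [h1, h2]⟩
    simp only [ne_eq, List.map_eq_nil_iff]
    exact List.ne_nil_of_mem this
  obtain ⟨c, rest, hcr⟩ := List.exists_cons_of_ne_nil hne
  rw [hcr] at hpw ⊢
  rw [hkeyed, hcr]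
  have hrest_lt : ∀ j ∈ rest, c < j := (List.pairwise_cons.mp hpw).1
  have hrest_pw : rest.Pairwise (· < · : Int → Int → Prop) := (List.pairwise_cons.mp hpw).2
  -- B's side: sorted2 is a foldl of insertBy with pvBefore
  have hs2 : PySem.List.sorted2 (((c :: rest).map (fun i => ((key i, i) : Int × Int))))
      (fun q => q.1) (fun q => q.2)
      = ((c :: rest).map (fun i => ((key i, i) : Int × Int))).foldl
          (fun acc x => PySem.List.insertBy pvBefore x acc) [] := rfl
  obtain ⟨t', ht'⟩ := pv_foldl_insertBy_head pvBefore
    (rest.map (fun i => ((key i, i) : Int × Int))) (key c, c) []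
  have hhead := pv_fold_pairs key rest c hrest_lt hrest_pw
  rw [hs2]
  simp only [List.map_cons, List.foldl_cons]
  rw [show PySem.List.insertBy pvBefore ((key c, c) : Int × Int) [] = [(key c, c)] from rfl]
  rw [ht', hhead]
  -- A's side
  set R := rest.foldl (fun m x => if key x < key m then x else m) c with hR
  have hmin : PySem.List.min? (c :: rest) key = some R := by
    rw [pv_min?_eq_foldl]
    simp only [List.foldl_cons]
    rw [show pvStep key none c = some c from rfl]
    exact pv_foldl_step_some key rest c
  by_cases hlen : (c :: rest).length = 1
  · have : rest = [] := by
      simp only [List.length_cons] at hlen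
      exact List.eq_nil_of_length_eq_zero (by omega)
    subst this
    simp [hlen, hR]
  · simp only [hlen, if_false, hmin, Option.getD_some]
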